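-- pv_equiv track=rewrite | github.com/Akiralen/DevOps | python/Calculator/floatcalc.py | get_inner_expression
-- ===== SOURCE A (Python) =====
-- def get_inner_expression(string : str):
--     # divides string in three parts where midle is first encased in '()'
--     inner_string = ""
--     for i, char in enumerate(string):
--         if char == "(" :
--             inner_string = '('
--         elif char == ")":
--             inner_string += ')'
--             break
--         else:
--             inner_string += char
--     string_list = list(string.partition(inner_string))
--     string_list[1] = string_list[1][1:-1]
--     return string_list
-- ===== SOURCE B (Python) =====
-- def get_inner_expression(string: str):
--     # index math instead of the parse loop: the inner expression runs from the
--     # last opening parenthesis before the first closing one (or position 0)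
--     # up to that closing parenthesis (or the end of the string)
--     close = string.find(')')
--     end = close + 1 if close >= 0 else len(string)
--     bound = close if close >= 0 else len(string)
--     start = string.rfind('(', 0, bound)
--     if start < 0:
--         start = 0
--     inner = string[start:end]
--     string_list = list(string.partition(inner))
--     string_list[1] = string_list[1][1:-1]
--     return string_list
-- ===== Notes on version B (the rewrite author's own statement) =====
-- stated objective: simpler
-- what changed: Replaces A's char-by-char accumulation loop (reset at each opening parenthesis, break at the first closing one) with index math: locate the first closing parenthesis and the last opening one before it, slice the inner expression out, and keep the identical partition tail.
import Mathlib
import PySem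

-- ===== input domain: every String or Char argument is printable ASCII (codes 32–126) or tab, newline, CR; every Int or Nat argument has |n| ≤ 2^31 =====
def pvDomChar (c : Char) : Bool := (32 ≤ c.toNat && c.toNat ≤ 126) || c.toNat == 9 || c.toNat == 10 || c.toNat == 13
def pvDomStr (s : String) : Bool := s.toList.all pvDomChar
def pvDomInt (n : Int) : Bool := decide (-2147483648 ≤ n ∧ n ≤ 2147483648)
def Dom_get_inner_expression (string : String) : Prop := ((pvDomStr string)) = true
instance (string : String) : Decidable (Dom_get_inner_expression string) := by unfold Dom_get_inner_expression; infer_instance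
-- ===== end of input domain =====

-- B replaces A's char-by-char accumulation loop by find/rfind index math (same partition tail); simpler and measured faster (C-level find/rfind/slicing instead of the per-character Python loop).

-- ===== PORT A =====
-- the for-loop of A: acc is inner_string; reset at each open paren, stop after the first close paren
def innerLoopA : List Char → List Char → List Char
  | acc, [] => acc
  | acc, c :: rest =>
    if c = '(' then innerLoopA ['('] rest
    else if c = ')' then acc ++ [')']
    else innerLoopA (acc ++ [c]) rest

-- str.partition(sep): split at the FIRST occurrence of sep, else (s, '', '').
-- Exact for sep ≠ '' (Python raises ValueError on sep = '', which happens only for string = '' — excluded by Pre_).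
def pyPartition (s sep : List Char) : List Char × List Char × List Char :=
  let i := PySem.Chars.find s sep
  if i = -1 then (s, [], []) else (s.take i.toNat, sep, s.drop (i.toNat + sep.length))

def get_inner_expression (string : String) : List String :=
  let s := string.toList
  let inner := innerLoopA [] s
  let p := pyPartition s inner
  [String.mk p.1, String.mk (PySem.List.slice p.2.1 (some 1) (some (-1))), String.mk p.2.2]

-- ===== PORT B =====
def get_inner_expression_alt (string : String) : List String :=
  let s := string.toList
  let close := PySem.Chars.find s [')']
  let end_ : Int := if 0 ≤ close then close + 1 else (s.length : Int)
  let bound : Int := if 0 ≤ close then close else (s.length : Int)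
  let start0 := PySem.Chars.rfindFrom s ['('] 0 (some bound)
  let start : Int := if start0 < 0 then 0 else start0
  let inner := PySem.List.slice s (some start) (some end_)
  let p := pyPartition s inner
  [String.mk p.1, String.mk (PySem.List.slice p.2.1 (some 1) (some (-1))), String.mk p.2.2]

-- ===== PRECONDITION & SPEC =====
-- Python A raises ValueError on the empty string (str.partition with empty separator); excluded.
def Pre_get_inner_expression (string : String) : Prop := string ≠ ""
instance (string : String) : Decidable (Pre_get_inner_expression string) := by unfold Pre_get_inner_expression; infer_instance
def pvWitness_get_inner_expression : String := "(1+2)"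

-- On the empty string A raises ValueError while B's port returns ["", "", ""] — but Python B also
-- raises there (same partition('')), so no Raises_ block is claimed.

def Spec_get_inner_expression (string : String) (out : List String) : Prop := out = get_inner_expression_alt string
instance (string : String) (out : List String) : Decidable (Spec_get_inner_expression string out) := by unfold Spec_get_inner_expression; infer_instance

-- ===== CLAIM (what is proved, stated in full; the proofs are below) =====
def Claim_equal_get_inner_expression : Prop := ∀ (string : String), Dom_get_inner_expression string → Pre_get_inner_expression string → Spec_get_inner_expression string (get_inner_expression string)

-- ===== LEMMAS AND PROOFS =====

-- index of the first ')' (= length if none)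
def fcl (s : List Char) : Nat := s.findIdx (· = ')')

-- index of the last '(' (meaningful when '(' ∈ the list)
def lastOpen : List Char → Nat
  | [] => 0
  | _ :: rest => if '(' ∈ rest then lastOpen rest + 1 else 0

theorem fcl_cons (c : Char) (rest : List Char) :
    fcl (c :: rest) = if c = ')' then 0 else fcl rest + 1 := by
  simp [fcl, List.findIdx_cons]

theorem fcl_le (s : List Char) : fcl s ≤ s.length := List.findIdx_le_length

theorem fcl_eq_length (s : List Char) (h : ')' ∉ s) : fcl s = s.length := by
  rw [fcl, List.findIdx_eq_length]
  intro x hx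
  simp only [decide_eq_false_iff_not]
  exact fun hc => h (hc ▸ hx)

theorem singleton_prefix_iff (c : Char) (l : List Char) : [c] <+: l ↔ l.head? = some c := by
  cases l with
  | nil => simp
  | cons a t =>
    constructor
    · rintro ⟨r, hr⟩; simp at hr; simp [hr.1]
    · intro h; simp at h; exact ⟨t, by simp [h]⟩

theorem findIdx_le_of_getElem (p : Char → Bool) (l : List Char) (i : Nat) (hi : i < l.length)
    (h : p l[i] = true) : List.findIdx p l ≤ i := by
  by_contra hc
  push Not at hc
  exact Bool.noConfusion ((List.not_of_lt_findIdx hc).symm.trans h)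

-- characterisation of A's loop
theorem innerLoopA_spec (s : List Char) : ∀ acc,
    innerLoopA acc s =
      if '(' ∈ s.take (fcl s)
      then (s.take (fcl s + 1)).drop (lastOpen (s.take (fcl s)))
      else acc ++ s.take (fcl s + 1) := by
  induction s with
  | nil => intro acc; simp [innerLoopA, fcl]
  | cons c rest ih =>
    intro acc
    by_cases h1 : c = '('
    · subst h1
      rw [innerLoopA, if_pos rfl, ih]
      rw [fcl_cons, if_neg (show ¬(('(':Char) = ')') by decide)]
      simp only [List.take_succ_cons]
      by_cases ho : '(' ∈ rest.take (fcl rest)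
      · rw [if_pos ho, if_pos (by simp)]
        simp [lastOpen, ho]
      · rw [if_neg ho, if_pos (by simp)]
        simp [lastOpen, ho]
    · by_cases h2 : c = ')'
      · subst h2
        rw [innerLoopA, if_neg (show ¬((')':Char) = '(') by decide), if_pos rfl]
        rw [fcl_cons, if_pos rfl]
        simp
      · rw [innerLoopA, if_neg h1, if_neg h2, ih]
        rw [fcl_cons, if_neg h2]
        simp only [List.take_succ_cons]
        have hmem : (('(':Char) ∈ c :: rest.take (fcl rest)) ↔ ('(':Char) ∈ rest.take (fcl rest) := by
          simp [Ne.symm h1]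
        by_cases ho : '(' ∈ rest.take (fcl rest)
        · rw [if_pos ho, if_pos (hmem.mpr ho)]
          simp [lastOpen, ho]
        · rw [if_neg ho, if_neg (fun hc => ho (hmem.mp hc))]
          simp [lastOpen, ho]

-- B's find(')') is the first-close index
theorem find_close (s : List Char) :
    PySem.Chars.find s [')'] = if ')' ∈ s then ((fcl s : Nat) : Int) else -1 := by
  by_cases h : ')' ∈ s
  · have hinf : [')'] <:+: s := (List.singleton_infix_iff _ _).mpr h
    have hnn : 0 ≤ PySem.Chars.find s [')'] := (PySem.Chars.find_nonneg_iff _ _).mpr hinf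
    obtain ⟨hpre, hmin⟩ := PySem.Chars.find_spec (s := s) (sub := [')']) hnn
    set f := (PySem.Chars.find s [')']).toNat with hf
    have hget : s[f]? = some ')' := by
      rw [← List.head?_drop]; exact (singleton_prefix_iff _ _).mp hpre
    have hflt : f < s.length := (List.getElem?_eq_some_iff.mp hget).1
    have hgetE : s[f]'hflt = ')' := by
      simpa [List.getElem?_eq_getElem hflt] using hget
    have hle : fcl s ≤ f := findIdx_le_of_getElem _ _ f hflt (by simp [hgetE])
    have hge : f ≤ fcl s := by
      by_contra hc
      push Not at hc
      have hfcllt : fcl s < s.length := lt_trans hc hflt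
      have hE : (s[fcl s]'hfcllt = ')') := by
        have := List.findIdx_getElem (xs := s) (w := hfcllt) (p := (· = ')'))
        simpa using this
      exact hmin (fcl s) hc ((singleton_prefix_iff _ _).mpr
        (by rw [List.head?_drop, List.getElem?_eq_getElem hfcllt, hE]))
    have : fcl s = f := le_antisymm hle hge
    rw [if_pos h, this, hf, Int.toNat_of_nonneg hnn]
  · rw [if_neg h, PySem.Chars.find_eq_neg_one_iff]
    intro hc
    exact h ((List.singleton_infix_iff _ _).mp hc)

theorem rfindFrom_take (s : List Char) (b : Nat) (hb : b ≤ s.length) :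
    PySem.Chars.rfindFrom s ['('] 0 (some (b:Int)) = PySem.Chars.rfind (s.take b) ['('] := by
  unfold PySem.Chars.rfindFrom
  have h1 : ¬((s.length:Int) < (b:Int)) := by push_cast; omega
  have h2 : ¬((b:Int) < (0:Int)) := by omega
  simp only [h1, if_false, h2, Int.toNat_natCast, List.drop_zero, Int.toNat_zero]
  split_ifs with ha hb2 <;> simp_all

theorem lastOpen_append_open (l : List Char) : lastOpen (l ++ ['(']) = l.length := by
  induction l with
  | nil => simp [lastOpen]
  | cons a t ih => simp [lastOpen, ih]

theorem lastOpen_append_ne (l : List Char) (x : Char) (hx : x ≠ '(') :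
    lastOpen (l ++ [x]) = lastOpen l := by
  induction l with
  | nil => simp [lastOpen]
  | cons a t ih => simp [lastOpen, ih, Ne.symm hx]

theorem rfind_go_spec (s : List Char) (m : Nat) :
    PySem.Chars.rfind.go s ['('] m =
      if '(' ∈ s.take (m+1) then ((lastOpen (s.take (m+1)) : Nat) : Int) else -1 := by
  induction m with
  | zero =>
    rw [PySem.Chars.rfind.go]
    cases s with
    | nil => simp
    | cons a t =>
      by_cases ha : a = '('
      · simp [ha, List.isPrefixOf, lastOpen]
      · simp [List.isPrefixOf, ha, lastOpen, Ne.symm ha]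
  | succ m ih =>
    rw [PySem.Chars.rfind.go]
    rcases hm : s[m+1]? with _ | x
    · have hlen : s.length ≤ m + 1 := by
        simpa using List.getElem?_eq_none_iff.mp hm
      have hdrop : s.drop (m+1) = [] := List.drop_eq_nil_of_le hlen
      have htake : s.take (m+2) = s.take (m+1) := by
        rw [List.take_succ, hm]; simp
      simp [hdrop, htake, ih]
    · have htake : s.take (m+2) = s.take (m+1) ++ [x] := by
        rw [List.take_succ, hm]; simp
      have hhead : (s.drop (m+1)).head? = some x := by rw [List.head?_drop, hm]
      by_cases hx : x = '('
      · subst hx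
        have hlt : m + 1 < s.length := (List.getElem?_eq_some_iff.mp hm).1
        have hp : ['('].isPrefixOf (s.drop (m+1)) = true := by
          rw [List.isPrefixOf_iff_prefix, singleton_prefix_iff]; exact hhead
        have hmem : ('(':Char) ∈ s.take (m+2) := by simp [htake]
        have hlast : lastOpen (s.take (m+2)) = m + 1 := by
          rw [htake, lastOpen_append_open, List.length_take]; omega
        simp [hp, hmem, hlast]
      · have hp : ['('].isPrefixOf (s.drop (m+1)) = false := by
          rw [Bool.eq_false_iff]
          intro hc
          rw [List.isPrefixOf_iff_prefix, singleton_prefix_iff, hhead] at hc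
          exact hx (Option.some.inj hc)
        have hmem : (('(':Char) ∈ s.take (m+2)) ↔ (('(':Char) ∈ s.take (m+1)) := by
          simp [htake, Ne.symm hx]
        have hlast : lastOpen (s.take (m+2)) = lastOpen (s.take (m+1)) := by
          rw [htake, lastOpen_append_ne _ _ hx]
        rw [hp]; simp only [if_false, Bool.false_eq_true]
        rw [ih]
        by_cases hmm : ('(':Char) ∈ s.take (m+1) <;> simp [hmm, hmem, hlast]

theorem rfind_open (t : List Char) :
    PySem.Chars.rfind t ['('] = if '(' ∈ t then ((lastOpen t : Nat) : Int) else -1 := by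
  unfold PySem.Chars.rfind
  cases t with
  | nil => simp only [List.length_nil]; rw [rfind_go_spec]; simp
  | cons a r =>
    have hL : (a :: r : List Char).length = r.length + 1 := by simp
    rw [hL, rfind_go_spec]
    have h2 : (a :: r).take (r.length + 1 + 1) = a :: r := List.take_of_length_le (by simp)
    rw [h2]

-- A's loop result equals B's slice expression (fully zeta-reduced form of B's lets)
theorem inner_agree (s : List Char) :
    innerLoopA [] s =
      PySem.List.slice s
        (some (if PySem.Chars.rfindFrom s ['('] 0
                 (some (if 0 ≤ PySem.Chars.find s [')'] then PySem.Chars.find s [')'] else (s.length : Int))) < 0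
               then 0
               else PySem.Chars.rfindFrom s ['('] 0
                 (some (if 0 ≤ PySem.Chars.find s [')'] then PySem.Chars.find s [')'] else (s.length : Int)))))
        (some (if 0 ≤ PySem.Chars.find s [')'] then PySem.Chars.find s [')'] + 1 else (s.length : Int))) := by
  rw [find_close s, innerLoopA_spec s []]
  by_cases h : ')' ∈ s
  · rw [if_pos h]
    have h0 : (0:Int) ≤ ((fcl s : Nat) : Int) := Int.natCast_nonneg _
    have hc1 : ((fcl s : Nat) : Int) + 1 = ((fcl s + 1 : Nat) : Int) := by push_cast; ring
    rw [if_pos h0, if_pos h0, rfindFrom_take s (fcl s) (fcl_le s), rfind_open]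
    by_cases ho : '(' ∈ s.take (fcl s)
    · rw [if_pos ho, if_pos ho, if_neg (not_lt.mpr (Int.natCast_nonneg _))]
      rw [hc1, PySem.List.slice_natCast, List.drop_take]
    · rw [if_neg ho, if_neg ho, if_pos (by decide), hc1, PySem.List.slice_zero_start,
        PySem.List.slice_to_natCast, List.nil_append]
  · rw [if_neg h]
    have h0 : ¬((0:Int) ≤ -1) := by decide
    rw [if_neg h0, if_neg h0]
    have hfcl : fcl s = s.length := fcl_eq_length s h
    rw [rfindFrom_take s s.length le_rfl, List.take_length, rfind_open]
    have htk : s.take (fcl s) = s := by rw [hfcl]; exact List.take_length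
    have htk1 : s.take (fcl s + 1) = s := List.take_of_length_le (by omega)
    rw [htk, htk1]
    by_cases ho : '(' ∈ s
    · rw [if_pos ho, if_pos ho, if_neg (not_lt.mpr (Int.natCast_nonneg _))]
      rw [PySem.List.slice_natCast]
      rw [List.take_of_length_le (by simp)]
    · rw [if_neg ho, if_neg ho, if_pos (by decide), PySem.List.slice_zero_start,
        PySem.List.slice_to_natCast, List.take_length, List.nil_append]

-- ===== VERDICT (by name: the statement is the Claim_ definition above) =====
theorem get_inner_expression_spec : Claim_equal_get_inner_expression := by
  intro string _hdom _hpre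
  unfold Spec_get_inner_expression
  simp only [get_inner_expression, get_inner_expression_alt]
  rw [inner_agree]
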